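-- pv_equiv track=rewrite | github.com/shkarupa-alex/ruconlluconv | ruconlluconv/gicr.py | repair_broken_composites
-- ===== SOURCE A (Python) =====
-- def repair_broken_composites(source_content):
--     target_content = []
--
--     composite_start = []
--     composite_end = []
--     sentence_end = []
--     for row in source_content.split('\n'):
--         cols = row.split('\t')
--         if not len(row.strip()) or len(cols) < 2:
--             composite_start.append(False)
--             composite_end.append(False)
--             sentence_end.append(True)
--             target_content.append(row)
--             continue
--         sentence_end.append(False)
--
--         if len(cols) == 6:
--             cols[5] = cols[5].replace('c-c+', '')
--             composite_start.append('c-' in cols[5])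
--             composite_end.append('c+' in cols[5])
--         else:
--             composite_start.append(False)
--             composite_end.append(False)
--         row = '\t'.join(cols)
--
--         target_content.append(row)
--
--     assert len(composite_start) == len(composite_end) == len(sentence_end)
--
--     composite_started = -1
--     composite_errors = []
--     for i, cs, ce, se in zip(range(len(composite_start)), composite_start, composite_end, sentence_end):
--         assert not cs or not ce
--         if cs:
--             if composite_started >= 0:
--                 composite_errors.append(composite_started)
--             composite_started = i
--         if ce:
--             composite_started = -1
--
--         if se and composite_started >= 0:
--             composite_errors.append(composite_started)
--             composite_started = -1
--
--     for idx, i in enumerate(composite_errors):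
--         cols = target_content[i].split('\t')
--         assert len(cols) == 6, cols
--
--         cols1 = target_content[i + 1].split('\t')
--         if 5 == len(cols1):
--             cols1.append('')
--         assert len(cols1) == 6 or len(cols1) == 3 or len(cols1) == 1 and sentence_end[i + 1]
--
--         if sentence_end[i + 1] or sentence_end[i + 2]:
--             cols[5] = cols[5].replace('c-', '')
--             composite_errors[idx] = 0
--         elif len(cols1) == 6:
--             cols[5] = cols[5].replace('c-', '')
--             composite_errors[idx] = 0
--         elif len(cols1) == 3 and cols1[2].strip()[0] not in {'.', '-'}:
--             cols[5] = cols[5].replace('c-', '')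
--             composite_errors[idx] = 0
--         elif len(cols1) == 3 and cols1[2].strip()[0] in {'.', '-'}:
--             cols1 += ['', '', 'c+']
--             composite_errors[idx] = 0
--
--         target_content[i] = '\t'.join(cols)
--         target_content[i + 1] = '\t'.join(cols1)
--
--     assert 0 == sum(composite_errors)
--
--     return '\n'.join(target_content)
-- ===== SOURCE B (Python) =====
-- def repair_broken_composites(source_content):
--     # Single fused pass: split rows, strip 'c-c+', and run the composite state
--     # machine inline; then one repair pass whose single condition chooses between
--     # completing the continuation row and dropping the dangling 'c-'.
--     target_content = []
--     sentence_end = []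
--     composite_errors = []
--     composite_started = -1
--     for i, row in enumerate(source_content.split('\n')):
--         cols = row.split('\t')
--         if not row.strip() or len(cols) < 2:
--             target_content.append(row)
--             sentence_end.append(True)
--             if composite_started >= 0:
--                 composite_errors.append(composite_started)
--                 composite_started = -1
--             continue
--         sentence_end.append(False)
--         if len(cols) == 6:
--             cols[5] = cols[5].replace('c-c+', '')
--             if 'c-' in cols[5]:
--                 if composite_started >= 0:
--                     composite_errors.append(composite_started)
--                 composite_started = i
--             if 'c+' in cols[5]:
--                 composite_started = -1
--             row = '\t'.join(cols)
--         target_content.append(row)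
--
--     for i in composite_errors:
--         cols = target_content[i].split('\t')
--         cols1 = target_content[i + 1].split('\t')
--         if len(cols1) == 5:
--             cols1.append('')
--         if (len(cols1) == 3
--                 and not (sentence_end[i + 1] or sentence_end[i + 2])
--                 and cols1[2].strip()[0] in {'.', '-'}):
--             cols1 += ['', '', 'c+']
--         else:
--             cols[5] = cols[5].replace('c-', '')
--         target_content[i] = '\t'.join(cols)
--         target_content[i + 1] = '\t'.join(cols1)
--
--     return '\n'.join(target_content)
-- ===== Notes on version B (the rewrite author's own statement) =====
-- stated objective: simpler
-- what changed: B fuses A's first two passes into one scan that fixes each row and runs the composite state machine inline (collecting the error rows as it goes), and replaces the repair pass's four-branch chain by a single condition choosing between completing the continuation row with a 'c+' and dropping the dangling 'c-'.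
import Mathlib
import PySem

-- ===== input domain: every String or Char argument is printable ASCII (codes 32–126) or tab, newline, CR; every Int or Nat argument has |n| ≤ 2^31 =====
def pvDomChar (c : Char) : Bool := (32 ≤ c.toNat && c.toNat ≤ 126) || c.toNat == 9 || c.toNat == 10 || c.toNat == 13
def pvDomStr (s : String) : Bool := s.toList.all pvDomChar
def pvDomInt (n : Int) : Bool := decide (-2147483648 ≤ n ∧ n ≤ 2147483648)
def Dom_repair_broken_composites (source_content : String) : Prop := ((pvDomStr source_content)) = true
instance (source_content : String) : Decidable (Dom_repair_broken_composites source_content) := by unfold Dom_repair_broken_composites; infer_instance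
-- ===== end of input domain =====

-- B fuses A's first two passes (row fixing + composite state machine) into one scan
-- and replaces the repair pass's four-branch chain by a single condition; objective:
-- simpler, same O(n) cost; equivalence is proved on Pre_ (the inputs where A raises
-- no exception).

-- shared primitive wrapper: s.split(sep) for a non-empty separator
def pvSplit (s sep : String) : List String := (PySem.Str.split? s sep).getD []

-- ===== PORT A =====
-- '\t'.join(cols)
def pvJoinTabA (cols : List String) : String := PySem.Str.join "\t" cols

-- pass 1: builds (target_content, composite_start, composite_end, sentence_end)
def pvPass1A : List String → List String × List Bool × List Bool × List Bool
  | [] => ([], [], [], [])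
  | row :: rest =>
    let cols := pvSplit row "\t"
    let p := pvPass1A rest
    if PySem.Str.len (PySem.Str.strip row) == 0 || decide (cols.length < 2) then
      (row :: p.1, false :: p.2.1, false :: p.2.2.1, true :: p.2.2.2)
    else if cols.length == 6 then
      let c5 := PySem.Str.replace (PySem.List.pyGetD cols 5 "") "c-c+" ""
      (pvJoinTabA (cols.set 5 c5) :: p.1,
       PySem.Str.isIn "c-" c5 :: p.2.1,
       PySem.Str.isIn "c+" c5 :: p.2.2.1,
       false :: p.2.2.2)
    else
      (pvJoinTabA cols :: p.1, false :: p.2.1, false :: p.2.2.1, false :: p.2.2.2)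

-- pass 2 over zip(range(n), composite_start, composite_end, sentence_end):
-- collects composite_errors (the 'assert not cs or not ce' raises outside Pre_)
def pvPass2A (i started : Int) : List (Bool × Bool × Bool) → List Int
  | [] => []
  | (cs, ce, se) :: rest =>
    let errs1 : List Int := if cs && decide (0 ≤ started) then [started] else []
    let st1 := if cs then i else started
    let st2 := if ce then (-1 : Int) else st1
    let errs2 : List Int := if se && decide (0 ≤ st2) then [st2] else []
    let st3 := if se && decide (0 ≤ st2) then (-1 : Int) else st2
    errs1 ++ errs2 ++ pvPass2A (i + 1) st3 rest

-- target_content[i] = v  (error indices are ≥ 0 when A returns)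
def pvSetAtA (xs : List String) (i : Int) (v : String) : List String :=
  if 0 ≤ i then xs.set i.toNat v else xs

-- one iteration of pass 3: the four-branch repair of rows i and i+1 (the asserts and
-- the IndexErrors on sentence_end[i+2] / cols1[2].strip()[0] raise outside Pre_;
-- there the port falls through leaving tgt unchanged)
def pvStep3A (send : List Bool) (tgt : List String) (i : Int) : List String :=
  let cols := pvSplit (PySem.List.pyGetD tgt i "") "\t"
  let cols1a := pvSplit (PySem.List.pyGetD tgt (i + 1) "") "\t"
  let cols1 := if cols1a.length == 5 then cols1a ++ [""] else cols1a
  let se1 := PySem.List.pyGetD send (i + 1) true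
  let se2 := PySem.List.pyGetD send (i + 2) true
  let c0 := PySem.Str.pyGet? (PySem.Str.strip (PySem.List.pyGetD cols1 2 "")) 0
  let drop5 := cols.set 5 (PySem.Str.replace (PySem.List.pyGetD cols 5 "") "c-" "")
  if se1 || se2 then
    pvSetAtA (pvSetAtA tgt i (pvJoinTabA drop5)) (i + 1) (pvJoinTabA cols1)
  else if cols1.length == 6 then
    pvSetAtA (pvSetAtA tgt i (pvJoinTabA drop5)) (i + 1) (pvJoinTabA cols1)
  else if cols1.length == 3 && !(c0 == some '.' || c0 == some '-') then
    pvSetAtA (pvSetAtA tgt i (pvJoinTabA drop5)) (i + 1) (pvJoinTabA cols1)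
  else if cols1.length == 3 && (c0 == some '.' || c0 == some '-') then
    pvSetAtA (pvSetAtA tgt i (pvJoinTabA cols)) (i + 1) (pvJoinTabA (cols1 ++ ["", "", "c+"]))
  else
    tgt

-- pass 3: for idx, i in enumerate(composite_errors): rewrite rows i and i+1
def pvPass3A (send : List Bool) (tgt0 : List String) (errs : List Int) : List String :=
  errs.foldl (pvStep3A send) tgt0

def repair_broken_composites (source_content : String) : String :=
  let p := pvPass1A (pvSplit source_content "\n")
  let errs := pvPass2A 0 (-1) (p.2.1.zip (p.2.2.1.zip p.2.2.2))
  PySem.Str.join "\n" (pvPass3A p.2.2.2 p.1 errs)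

-- ===== PORT B =====
-- '\t'.join(cols)
def pvJoinTabB (cols : List String) : String := PySem.Str.join "\t" cols

-- target_content[i] = v
def pvSetAtB (xs : List String) (i : Int) (v : String) : List String :=
  if 0 ≤ i then xs.set i.toNat v else xs

-- fused scan: builds (target_content, sentence_end, composite_errors) in one pass
def pvScanB (i started : Int) : List String → List String × List Bool × List Int
  | [] => ([], [], [])
  | row :: rest =>
    let cols := pvSplit row "\t"
    if PySem.Str.len (PySem.Str.strip row) == 0 || decide (cols.length < 2) then
      let errception : List Int := if decide (0 ≤ started) then [started] else []
      let q := pvScanB (i + 1) (if decide (0 ≤ started) then -1 else started) rest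
      (row :: q.1, true :: q.2.1, errception ++ q.2.2)
    else if cols.length == 6 then
      let c5 := PySem.Str.replace (PySem.List.pyGetD cols 5 "") "c-c+" ""
      let errs0 : List Int := if PySem.Str.isIn "c-" c5 && decide (0 ≤ started) then [started] else []
      let st1 := if PySem.Str.isIn "c-" c5 then i else started
      let st2 := if PySem.Str.isIn "c+" c5 then (-1 : Int) else st1
      let q := pvScanB (i + 1) st2 rest
      (pvJoinTabB (cols.set 5 c5) :: q.1, false :: q.2.1, errs0 ++ q.2.2)
    else
      let q := pvScanB (i + 1) started rest
      (row :: q.1, false :: q.2.1, q.2.2)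

-- one repair step: a single condition chooses between completing the continuation
-- row with a 'c+' and dropping the dangling 'c-'
def pvStepB (send : List Bool) (tgt : List String) (i : Int) : List String :=
  let cols := pvSplit (PySem.List.pyGetD tgt i "") "\t"
  let cols1a := pvSplit (PySem.List.pyGetD tgt (i + 1) "") "\t"
  let cols1 := if cols1a.length == 5 then cols1a ++ [""] else cols1a
  let c0 := PySem.Str.pyGet? (PySem.Str.strip (PySem.List.pyGetD cols1 2 "")) 0
  let cont := cols1.length == 3
    && !(PySem.List.pyGetD send (i + 1) true || PySem.List.pyGetD send (i + 2) true)
    && (c0 == some '.' || c0 == some '-')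
  let pair :=
    if cont then (cols, cols1 ++ ["", "", "c+"])
    else (cols.set 5 (PySem.Str.replace (PySem.List.pyGetD cols 5 "") "c-" ""), cols1)
  pvSetAtB (pvSetAtB tgt i (pvJoinTabB pair.1)) (i + 1) (pvJoinTabB pair.2)

def pvRepairB (send : List Bool) (tgt0 : List String) (errs : List Int) : List String :=
  errs.foldl (pvStepB send) tgt0

def repair_broken_composites_alt (source_content : String) : String :=
  let q := pvScanB 0 (-1) (pvSplit source_content "\n")
  PySem.Str.join "\n" (pvRepairB q.2.1 q.1 q.2.2)

-- ===== PRECONDITION & SPEC =====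
-- per-row flags exactly as A computes them: sentence end, composite start/end
def pvSeF (row : String) : Bool :=
  PySem.Str.len (PySem.Str.strip row) == 0 || decide ((pvSplit row "\t").length < 2)
def pvC5 (row : String) : String :=
  PySem.Str.replace (PySem.List.pyGetD (pvSplit row "\t") 5 "") "c-c+" ""
def pvCsF (row : String) : Bool :=
  !pvSeF row && (pvSplit row "\t").length == 6 && PySem.Str.isIn "c-" (pvC5 row)
def pvCeF (row : String) : Bool :=
  !pvSeF row && (pvSplit row "\t").length == 6 && PySem.Str.isIn "c+" (pvC5 row)
def pvSigF (row : String) : Bool := pvCsF row || pvCeF row || pvSeF row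

-- row e opens a composite that A's state machine flags as broken: the first later
-- row carrying a marker flag is a composite start or a sentence end, not a close
def pvIsErr (rows : List String) (e : Nat) : Bool :=
  decide (e < rows.length) && pvCsF (rows.getD e "") &&
  (List.range rows.length).any (fun j =>
    decide (e < j) && (pvCsF (rows.getD j "") || pvSeF (rows.getD j "")) &&
    (List.range j).all (fun k => decide (k ≤ e) || !pvSigF (rows.getD k "")))

-- the conditions under which A's repair of error row e runs without an exception
def pvSafe (rows : List String) (e : Nat) : Bool :=
  ((if (pvSplit (rows.getD (e + 1) "") "\t").length == 5 then (6:Nat)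
      else (pvSplit (rows.getD (e + 1) "") "\t").length) == 6 ||
   (if (pvSplit (rows.getD (e + 1) "") "\t").length == 5 then (6:Nat)
      else (pvSplit (rows.getD (e + 1) "") "\t").length) == 3 ||
   ((pvSplit (rows.getD (e + 1) "") "\t").length == 1 && pvSeF (rows.getD (e + 1) ""))) &&
  (pvSeF (rows.getD (e + 1) "") || decide (e + 2 < rows.length)) &&
  (pvSeF (rows.getD (e + 1) "") || pvSeF (rows.getD (e + 2) "") ||
   !((if (pvSplit (rows.getD (e + 1) "") "\t").length == 5 then (6:Nat)
        else (pvSplit (rows.getD (e + 1) "") "\t").length) == 3) ||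
   !(PySem.Str.strip (PySem.List.pyGetD (pvSplit (rows.getD (e + 1) "") "\t") 2 "") == ""))

-- Pre_ excludes exactly the inputs on which A raises: a row whose 6th field keeps
-- both 'c-' and 'c+' (A's 'assert not cs or not ce' fails), and broken-composite
-- rows whose following rows are malformed for the repair pass (wrong column count,
-- missing look-ahead row, or an empty third field), where A's asserts or index
-- look-aheads raise AssertionError/IndexError.
def Pre_repair_broken_composites (source_content : String) : Prop :=
  (∀ r ∈ pvSplit source_content "\n", ¬(pvCsF r = true ∧ pvCeF r = true)) ∧
  (∀ e ∈ List.range (pvSplit source_content "\n").length,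
    pvIsErr (pvSplit source_content "\n") e = true →
    pvSafe (pvSplit source_content "\n") e = true)
instance (source_content : String) : Decidable (Pre_repair_broken_composites source_content) := by
  unfold Pre_repair_broken_composites; infer_instance

def pvWitness_repair_broken_composites : String :=
  "1\ta\tb\tc\td\tc-x\n2\ta\tb\tc\td\tc-y\n3\ta\tb\tc\td\tc+"

def Spec_repair_broken_composites (source_content : String) (out : String) : Prop :=
  out = repair_broken_composites_alt source_content
instance (source_content : String) (out : String) : Decidable (Spec_repair_broken_composites source_content out) := by
  unfold Spec_repair_broken_composites; infer_instance

-- ===== CLAIM =====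
def Claim_equal_repair_broken_composites : Prop :=
  ∀ (source_content : String), Dom_repair_broken_composites source_content →
    Pre_repair_broken_composites source_content →
    Spec_repair_broken_composites source_content (repair_broken_composites source_content)

-- ===== LEMMAS AND PROOFS =====

-- the per-row transformation pass 1 applies
def pvFixRow (row : String) : String :=
  let cols := pvSplit row "\t"
  if PySem.Str.len (PySem.Str.strip row) == 0 || decide (cols.length < 2) then row
  else if cols.length == 6 then
    PySem.Str.join "\t" (cols.set 5 (PySem.Str.replace (PySem.List.pyGetD cols 5 "") "c-c+" ""))
  else row

-- ---------- splitOn / join groundwork ----------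

lemma pv_intercalate_cons (sep a : List Char) (xs : List (List Char)) (h : xs ≠ []) :
    sep.intercalate (a :: xs) = a ++ sep ++ sep.intercalate xs := by
  cases xs with
  | nil => exact absurd rfl h
  | cons b tl => simp [List.intercalate]

lemma pv_intercalate_append_singleton (sep y : List Char) :
    ∀ (xs : List (List Char)), xs ≠ [] → sep.intercalate (xs ++ [y]) = sep.intercalate xs ++ sep ++ y := by
  intro xs
  induction xs with
  | nil => intro h; exact absurd rfl h
  | cons a tl ih =>
    intro _
    cases tl with
    | nil => simp [List.intercalate]
    | cons b tl2 =>
      rw [List.cons_append, pv_intercalate_cons sep a _ (by simp),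
          pv_intercalate_cons sep a _ (by simp), ih (by simp)]
      simp [List.append_assoc]

lemma pv_intercalate_last_append (sep q : List Char) :
    ∀ (ys : List (List Char)) (p : List Char),
      sep.intercalate (ys ++ [p ++ q]) = sep.intercalate (ys ++ [p]) ++ q := by
  intro ys
  induction ys with
  | nil => intro p; simp [List.intercalate]
  | cons a tl ih =>
    intro p
    rw [List.cons_append, List.cons_append,
        pv_intercalate_cons sep a _ (by simp), pv_intercalate_cons sep a _ (by simp), ih]
    simp [List.append_assoc]

lemma pv_go_intercalate (sep : List Char) (hsep : sep ≠ []) :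
    ∀ (fuel : Nat) (l cur : List Char) (acc : List (List Char)), l.length < fuel →
      sep.intercalate (PySem.Chars.splitOn.go sep fuel l cur acc) =
        sep.intercalate ((cur.reverse :: acc).reverse) ++ l := by
  intro fuel
  induction fuel with
  | zero => intro l cur acc h; exact absurd h (by omega)
  | succ f ih =>
    intro l cur acc h
    cases l with
    | nil => simp [PySem.Chars.splitOn.go]
    | cons c rest =>
      by_cases hp : sep.isPrefixOf (c :: rest) = true
      · rw [show PySem.Chars.splitOn.go sep (f+1) (c :: rest) cur acc
            = PySem.Chars.splitOn.go sep f (List.drop sep.length (c :: rest)) [] (cur.reverse :: acc) by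
          simp [PySem.Chars.splitOn.go, hp]]
        have hsl : 1 ≤ sep.length := List.length_pos_iff.mpr hsep
        have hlt : (List.drop sep.length (c :: rest)).length < f := by
          simp only [List.length_drop, List.length_cons] at *
          omega
        rw [ih _ _ _ hlt]
        have hpre : sep ++ List.drop sep.length (c :: rest) = c :: rest := by
          have := List.isPrefixOf_iff_prefix.mp hp
          obtain ⟨t, ht⟩ := this
          rw [← ht, List.drop_left' rfl]
        conv_rhs => rw [← hpre]
        simp only [List.reverse_cons, List.reverse_nil]
        rw [← List.append_assoc, pv_intercalate_append_singleton sep [] _ (by simp)]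
        simp [List.append_assoc]
      · rw [show PySem.Chars.splitOn.go sep (f+1) (c :: rest) cur acc
            = PySem.Chars.splitOn.go sep f rest (c :: cur) acc by
          simp [PySem.Chars.splitOn.go, hp]]
        rw [ih _ _ _ (by simpa using Nat.lt_of_succ_lt_succ h)]
        rw [show (c :: cur).reverse = cur.reverse ++ [c] by simp]
        rw [List.reverse_cons, List.reverse_cons, pv_intercalate_last_append]
        simp

lemma pv_join_split_tab (row : String) : pvJoinTabA (pvSplit row "\t") = row := by
  unfold pvJoinTabA pvSplit
  simp only [PySem.Str.split?, PySem.Chars.split?, PySem.Str.join, PySem.Chars.join]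
  rw [if_neg (by decide)]
  simp only [Option.map_some, Option.getD_some, List.map_map]
  have h1 : String.toList ∘ String.ofList = fun l : List Char => l := by
    funext l; exact String.toList_ofList
  rw [h1, List.map_id']
  rw [PySem.Chars.splitOn]
  rw [pv_go_intercalate "\t".toList (by decide) _ _ _ _ (Nat.lt_succ_self _)]
  simp [List.intercalate, String.ofList_toList]

lemma pv_go_nil (fuel : Nat) (cur : List Char) (acc : List (List Char)) :
    PySem.Chars.splitOn.go ['\t'] fuel [] cur acc = (cur.reverse :: acc).reverse := by
  cases fuel <;> simp [PySem.Chars.splitOn.go]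

lemma pv_go_sep (fuel : Nat) (r cur : List Char) (acc : List (List Char)) (h : 0 < fuel) :
    PySem.Chars.splitOn.go ['\t'] fuel ('\t' :: r) cur acc =
      PySem.Chars.splitOn.go ['\t'] (fuel - 1) r [] (cur.reverse :: acc) := by
  cases fuel with
  | zero => omega
  | succ f => simp [PySem.Chars.splitOn.go, List.isPrefixOf]

lemma pv_go_nosep :
    ∀ (a : List Char) (fuel : Nat) (l cur : List Char) (acc : List (List Char)),
      '\t' ∉ a → a.length + l.length < fuel →
      PySem.Chars.splitOn.go ['\t'] fuel (a ++ l) cur acc =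
        PySem.Chars.splitOn.go ['\t'] (fuel - a.length) l (a.reverse ++ cur) acc := by
  intro a
  induction a with
  | nil => intro fuel l cur acc _ _; simp
  | cons d a' ih =>
    intro fuel l cur acc hfree hlt
    cases fuel with
    | zero => simp at hlt
    | succ f =>
      have hd : ('\t' : Char) ≠ d := fun h => hfree (h ▸ List.mem_cons_self)
      rw [show (d :: a') ++ l = d :: (a' ++ l) by simp]
      rw [show PySem.Chars.splitOn.go ['\t'] (f+1) (d :: (a' ++ l)) cur acc
          = PySem.Chars.splitOn.go ['\t'] f (a' ++ l) (d :: cur) acc by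
        simp [PySem.Chars.splitOn.go, List.isPrefixOf, hd]]
      rw [ih f l (d :: cur) acc (fun h => hfree (List.mem_cons_of_mem _ h)) (by simp at hlt ⊢; omega)]
      simp

lemma pv_splitOn_tabfree_go :
    ∀ (fuel : Nat) (l cur : List Char) (acc : List (List Char)),
      l.length < fuel → (∀ p ∈ acc, '\t' ∉ p) → '\t' ∉ cur →
      ∀ p ∈ PySem.Chars.splitOn.go ['\t'] fuel l cur acc, '\t' ∉ p := by
  intro fuel
  induction fuel with
  | zero => intro l cur acc h; omega
  | succ f ih =>
    intro l cur acc hlt hacc hcur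
    cases l with
    | nil =>
      rw [pv_go_nil]
      intro p hp
      simp only [List.mem_reverse, List.mem_cons] at hp
      rcases hp with h | h
      · subst h; simpa using hcur
      · exact hacc p h
    | cons c rest =>
      by_cases hc : c = '\t'
      · subst hc
        rw [pv_go_sep _ _ _ _ (Nat.succ_pos f)]
        refine ih _ _ _ (by simp at hlt ⊢; omega) ?_ (by simp)
        intro p hp
        rcases List.mem_cons.mp hp with h | h
        · subst h; simpa using hcur
        · exact hacc p h
      · rw [show PySem.Chars.splitOn.go ['\t'] (f+1) (c :: rest) cur acc
            = PySem.Chars.splitOn.go ['\t'] f rest (c :: cur) acc by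
          simp [PySem.Chars.splitOn.go, List.isPrefixOf, Ne.symm hc]]
        refine ih _ _ _ (by simpa using Nat.lt_of_succ_lt_succ hlt) hacc ?_
        intro h
        rcases List.mem_cons.mp h with h | h
        · exact hc h.symm
        · exact hcur h

lemma pv_splitOn_tabfree (s : List Char) :
    ∀ p ∈ PySem.Chars.splitOn s ['\t'], '\t' ∉ p := by
  rw [PySem.Chars.splitOn]
  exact pv_splitOn_tabfree_go _ _ _ _ (Nat.lt_succ_self _) (by simp) (by simp)

lemma pv_go_join :
    ∀ (l : List (List Char)), l ≠ [] → (∀ p ∈ l, '\t' ∉ p) →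
      ∀ (fuel : Nat) (acc : List (List Char)), (PySem.Chars.join ['\t'] l).length < fuel →
      PySem.Chars.splitOn.go ['\t'] fuel (PySem.Chars.join ['\t'] l) [] acc =
        acc.reverse ++ l := by
  intro l
  induction l with
  | nil => intro h; exact absurd rfl h
  | cons a tl ih =>
    intro _ hfree fuel acc hlt
    cases tl with
    | nil =>
      rw [PySem.Chars.join_singleton] at hlt ⊢
      rw [show (a : List Char) = a ++ [] by simp] at hlt ⊢
      rw [pv_go_nosep a fuel [] [] acc (hfree a (by simp)) (by simpa using hlt)]
      rw [pv_go_nil]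
      simp
    | cons b tl2 =>
      rw [PySem.Chars.join_cons_cons] at hlt ⊢
      have ha : '\t' ∉ a := hfree a (by simp)
      rw [show a ++ ['\t'] ++ PySem.Chars.join ['\t'] (b :: tl2)
          = a ++ ('\t' :: PySem.Chars.join ['\t'] (b :: tl2)) by simp]
      rw [pv_go_nosep a fuel _ [] acc ha (by simp at hlt ⊢; omega)]
      rw [pv_go_sep _ _ _ _ (by simp at hlt; omega)]
      rw [ih (by simp) (fun p hp => hfree p (List.mem_cons_of_mem _ hp)) _ _ (by simp at hlt ⊢; omega)]
      simp

lemma pv_splitOn_join (l : List (List Char)) (hne : l ≠ []) (hfree : ∀ p ∈ l, '\t' ∉ p) :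
    PySem.Chars.splitOn (PySem.Chars.join ['\t'] l) ['\t'] = l := by
  rw [PySem.Chars.splitOn, pv_go_join l hne hfree _ _ (Nat.lt_succ_self _)]
  simp

-- replace with a tab-free replacement keeps a tab-free string tab-free
lemma pv_replace_go_tabfree (old new : List Char) (hn : '\t' ∉ new) :
    ∀ (fuel : Nat) (l acc : List Char), '\t' ∉ l → '\t' ∉ acc →
      '\t' ∉ PySem.Chars.replace.go old new fuel l acc := by
  intro fuel
  induction fuel with
  | zero => intro l acc hl hacc; simp [PySem.Chars.replace.go]; tauto
  | succ f ih =>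
    intro l acc hl hacc
    cases l with
    | nil => simpa [PySem.Chars.replace.go] using hacc
    | cons c t =>
      by_cases hp : old.isPrefixOf (c :: t) = true
      · rw [show PySem.Chars.replace.go old new (f+1) (c :: t) acc
            = PySem.Chars.replace.go old new f (List.drop old.length (c :: t)) (new.reverse ++ acc) by
          simp [PySem.Chars.replace.go, hp]]
        exact ih _ _ (fun h => hl ((List.drop_sublist _ _).subset h))
          (by simp; tauto)
      · rw [show PySem.Chars.replace.go old new (f+1) (c :: t) acc
            = PySem.Chars.replace.go old new f t (c :: acc) by
          simp [PySem.Chars.replace.go, hp]]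
        refine ih _ _ (fun h => hl (List.mem_cons_of_mem _ h)) ?_
        intro h
        rcases List.mem_cons.mp h with h|h
        · exact hl (h ▸ List.mem_cons_self)
        · exact hacc h

lemma pv_replace_tabfree (s old new : List Char) (hs : '\t' ∉ s) (hn : '\t' ∉ new) :
    '\t' ∉ PySem.Chars.replace s old new := by
  rw [PySem.Chars.replace]
  by_cases he : old.isEmpty
  · simp [he]
    constructor
    · tauto
    · intro x hx
      exact ⟨fun h => hs (h ▸ hx), hn⟩
  · simp [he]
    exact pv_replace_go_tabfree old new hn _ _ _ hs (by simp)

lemma pvSplit_eq_map (s : String) (sep : String) (h : sep.toList ≠ []) :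
    pvSplit s sep = (PySem.Chars.splitOn s.toList sep.toList).map String.ofList := by
  unfold pvSplit
  simp [PySem.Str.split?, PySem.Chars.split?, List.isEmpty_iff, h]

lemma pvSplit_tabfree (s : String) :
    ∀ p ∈ pvSplit s "\t", '\t' ∉ p.toList := by
  rw [pvSplit_eq_map s "\t" (by decide)]
  intro p hp
  rcases List.mem_map.mp hp with ⟨q, hq, rfl⟩
  rw [String.toList_ofList]
  have : "\t".toList = ['\t'] := by decide
  exact pv_splitOn_tabfree s.toList q (this ▸ hq)

lemma pv_split_join_set (cols : List String) (c5 : String)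
    (h6 : cols.length = 6) (hfree : ∀ p ∈ cols, '\t' ∉ p.toList) (hc5 : '\t' ∉ c5.toList) :
    pvSplit (PySem.Str.join "\t" (cols.set 5 c5)) "\t" = cols.set 5 c5 := by
  rw [pvSplit_eq_map _ "\t" (by decide)]
  rw [PySem.Str.join]
  have ht : "\t".toList = ['\t'] := by decide
  rw [String.toList_ofList, ht]
  rw [pv_splitOn_join _ (by intro h; apply_fun List.length at h; simp [h6] at h) ?hf]
  case hf =>
    intro p hp
    rcases List.mem_map.mp hp with ⟨q, hq, rfl⟩
    rcases List.mem_or_eq_of_mem_set hq with h | rfl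
    · exact hfree q h
    · exact hc5
  rw [List.map_map]
  have h1 : String.ofList ∘ String.toList = fun x : String => x := by
    funext x; exact String.ofList_toList
  rw [h1, List.map_id']

lemma pv_fixRow_split (row : String)
    (hb : (PySem.Str.len (PySem.Str.strip row) == 0 || decide ((pvSplit row "\t").length < 2)) = false)
    (h6 : (pvSplit row "\t").length = 6) :
    pvSplit (pvFixRow row) "\t" =
      (pvSplit row "\t").set 5 (PySem.Str.replace (PySem.List.pyGetD (pvSplit row "\t") 5 "") "c-c+" "") := by
  unfold pvFixRow
  rw [if_neg (by rw [hb]; exact Bool.false_ne_true), if_pos (by simp [h6])]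
  refine pv_split_join_set _ _ h6 (pvSplit_tabfree row) ?_
  rw [PySem.Str.toList_replace]
  refine pv_replace_tabfree _ _ _ ?_ (by simp)
  have h5 : PySem.List.pyGetD (pvSplit row "\t") (5:Int) "" = (pvSplit row "\t").getD 5 "" := by
    exact_mod_cast PySem.List.pyGetD_natCast (pvSplit row "\t") 5 ""
  rw [h5]
  have hm : (pvSplit row "\t").getD 5 "" ∈ pvSplit row "\t" := by
    rw [List.getD_eq_getElem?_getD, List.getElem?_eq_getElem (by omega)]
    exact List.getElem_mem _
  exact pvSplit_tabfree row _ hm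

lemma pv_fixRow_split_length (row : String) :
    (pvSplit (pvFixRow row) "\t").length = (pvSplit row "\t").length := by
  by_cases hb : (PySem.Str.len (PySem.Str.strip row) == 0 || decide ((pvSplit row "\t").length < 2)) = true
  · unfold pvFixRow; rw [if_pos hb]
  · by_cases h6 : (pvSplit row "\t").length = 6
    · rw [pv_fixRow_split row (by simpa using hb) h6]; simp
    · unfold pvFixRow
      rw [if_neg (by simp_all), if_neg (by simpa using h6)]

-- ---------- pass 1 and the fused scan ----------

lemma pvPass1A_spec (l : List String) :
    pvPass1A l = (l.map pvFixRow, l.map pvCsF, l.map pvCeF, l.map pvSeF) := by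
  induction l with
  | nil => simp [pvPass1A]
  | cons row rest ih =>
    by_cases hb : (PySem.Str.len (PySem.Str.strip row) == 0 || decide ((pvSplit row "\t").length < 2)) = true
    · have hse : pvSeF row = true := by simpa [pvSeF] using hb
      have hcs : pvCsF row = false := by simp [pvCsF, hse]
      have hce : pvCeF row = false := by simp [pvCeF, hse]
      simp only [pvPass1A, ih, List.map_cons, hcs, hce, hse]
      rw [if_pos hb]
      simp only [pvFixRow]
      rw [if_pos hb]
    · have hse : pvSeF row = false := by simpa [pvSeF] using hb
      by_cases h6 : (pvSplit row "\t").length = 6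
      · have hcs : pvCsF row = PySem.Str.isIn "c-" (pvC5 row) := by simp [pvCsF, hse, h6]
        have hce : pvCeF row = PySem.Str.isIn "c+" (pvC5 row) := by simp [pvCeF, hse, h6]
        simp only [pvPass1A, ih, List.map_cons, hcs, hce, hse]
        rw [if_neg hb, if_pos (by simp [h6])]
        simp only [pvFixRow, pvC5]
        rw [if_neg hb, if_pos (by simp [h6])]
        simp [pvJoinTabA]
      · have hcs : pvCsF row = false := by simp [pvCsF, h6]
        have hce : pvCeF row = false := by simp [pvCeF, h6]
        simp only [pvPass1A, ih, List.map_cons, hcs, hce, hse]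
        rw [if_neg hb, if_neg (by simpa using h6)]
        simp only [pvFixRow]
        rw [if_neg hb, if_neg (by simpa using h6)]
        simp [pv_join_split_tab]

lemma pv_zip3_map (l : List String) :
    (l.map pvCsF).zip ((l.map pvCeF).zip (l.map pvSeF)) =
      l.map (fun r => (pvCsF r, pvCeF r, pvSeF r)) := by
  induction l with
  | nil => simp
  | cons a t ih => simp [ih]

lemma pvScanB_spec (l : List String) :
    ∀ i st : Int, pvScanB i st l =
      (l.map pvFixRow, l.map pvSeF,
       pvPass2A i st (l.map (fun r => (pvCsF r, pvCeF r, pvSeF r)))) := by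
  induction l with
  | nil => intro i st; simp [pvScanB, pvPass2A]
  | cons row rest ih =>
    intro i st
    by_cases hb : (PySem.Str.len (PySem.Str.strip row) == 0 || decide ((pvSplit row "\t").length < 2)) = true
    · have hse : pvSeF row = true := by simpa [pvSeF] using hb
      have hcs : pvCsF row = false := by simp [pvCsF, hse]
      have hce : pvCeF row = false := by simp [pvCeF, hse]
      simp only [pvScanB, List.map_cons, pvPass2A, ih, hcs, hce, hse]
      rw [if_pos hb]
      simp only [pvFixRow]
      rw [if_pos hb]
      simp
    · have hse : pvSeF row = false := by simpa [pvSeF] using hb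
      by_cases h6 : (pvSplit row "\t").length = 6
      · have hcs : pvCsF row = PySem.Str.isIn "c-" (PySem.Str.replace (PySem.List.pyGetD (pvSplit row "\t") 5 "") "c-c+" "") := by
          simp [pvCsF, pvC5, hse, h6]
        have hce : pvCeF row = PySem.Str.isIn "c+" (PySem.Str.replace (PySem.List.pyGetD (pvSplit row "\t") 5 "") "c-c+" "") := by
          simp [pvCeF, pvC5, hse, h6]
        have hfix : pvFixRow row = pvJoinTabB ((pvSplit row "\t").set 5 (PySem.Str.replace (PySem.List.pyGetD (pvSplit row "\t") 5 "") "c-c+" "")) := by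
          simp only [pvFixRow, pvJoinTabB]
          rw [if_neg hb, if_pos (by simp [h6])]
        simp only [pvScanB]
        rw [if_neg hb, if_pos (by simp [h6])]
        simp only [List.map_cons, pvPass2A, ih, hcs, hce, hse, hfix]
        simp
      · have hcs : pvCsF row = false := by simp [pvCsF, h6]
        have hce : pvCeF row = false := by simp [pvCeF, h6]
        have hfix : pvFixRow row = row := by
          simp only [pvFixRow]
          rw [if_neg hb, if_neg (by simpa using h6)]
        simp only [pvScanB]
        rw [if_neg hb, if_neg (by simpa using h6)]
        simp only [List.map_cons, pvPass2A, ih, hcs, hce, hse, hfix]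
        simp

-- ---------- soundness of the collected error list ----------

lemma pvIsErr_intro (full : List String) (s j : Nat) (hj : j < full.length) (hsj : s < j)
    (hcs : pvCsF (full.getD s "") = true)
    (hflush : pvCsF (full.getD j "") = true ∨ pvSeF (full.getD j "") = true)
    (hgap : ∀ k, k < j → s < k → pvSigF (full.getD k "") = false) :
    pvIsErr full s = true := by
  unfold pvIsErr
  refine (Bool.and_eq_true _ _).mpr ⟨(Bool.and_eq_true _ _).mpr ⟨by simp; omega, hcs⟩, ?_⟩
  rw [List.any_eq_true]
  refine ⟨j, by simp [List.mem_range]; omega, ?_⟩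
  refine (Bool.and_eq_true _ _).mpr ⟨(Bool.and_eq_true _ _).mpr ⟨by simp [hsj], by simpa using hflush⟩, ?_⟩
  rw [List.all_eq_true]
  intro k hk
  by_cases h : k ≤ s
  · simp [h]
  · have hg := hgap k (List.mem_range.mp hk) (by omega)
    rw [List.getD_eq_getElem?_getD] at hg
    simp [hg, h]

lemma pv_se_excl (row : String) (h : pvSeF row = true) :
    pvCsF row = false ∧ pvCeF row = false := by
  simp [pvCsF, pvCeF, h]

lemma pv_step_se_pos (i st : Int) (l : List (Bool × Bool × Bool)) (h : 0 ≤ st) :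
    pvPass2A i st ((false, false, true) :: l) = st :: pvPass2A (i + 1) (-1) l := by
  simp [pvPass2A, h]

lemma pv_step_se_neg (i st : Int) (l : List (Bool × Bool × Bool)) (h : ¬ 0 ≤ st) :
    pvPass2A i st ((false, false, true) :: l) = pvPass2A (i + 1) st l := by
  simp [pvPass2A, h]

lemma pv_step_cs_pos (i st : Int) (ce : Bool) (l : List (Bool × Bool × Bool)) (h : 0 ≤ st) :
    pvPass2A i st ((true, ce, false) :: l) =
      st :: pvPass2A (i + 1) (if ce then -1 else i) l := by
  cases ce <;> simp [pvPass2A, h]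

lemma pv_step_cs_neg (i st : Int) (ce : Bool) (l : List (Bool × Bool × Bool)) (h : ¬ 0 ≤ st) :
    pvPass2A i st ((true, ce, false) :: l) =
      pvPass2A (i + 1) (if ce then -1 else i) l := by
  cases ce <;> simp [pvPass2A, h]

lemma pv_step_plain (i st : Int) (ce : Bool) (l : List (Bool × Bool × Bool)) :
    pvPass2A i st ((false, ce, false) :: l) =
      pvPass2A (i + 1) (if ce then -1 else st) l := by
  cases ce <;> simp [pvPass2A]

set_option maxHeartbeats 1000000 in
lemma pvPass2A_sound (full : List String) :
    ∀ (rows : List String) (k : Nat) (st : Int), full.drop k = rows →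
      (st = -1 ∨ ∃ s : Nat, st = (s : Int) ∧ s < k ∧ pvCsF (full.getD s "") = true ∧
        ∀ m, m < k → s < m → pvSigF (full.getD m "") = false) →
      (∀ e ∈ pvPass2A k st (rows.map (fun r => (pvCsF r, pvCeF r, pvSeF r))),
          ∃ s : Nat, e = (s : Int) ∧ pvIsErr full s = true) ∧
      List.Pairwise (· < ·) (pvPass2A k st (rows.map (fun r => (pvCsF r, pvCeF r, pvSeF r)))) ∧
      (∀ e ∈ pvPass2A k st (rows.map (fun r => (pvCsF r, pvCeF r, pvSeF r))),
          (e = st ∧ 0 ≤ st) ∨ (k : Int) ≤ e) := by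
  intro rows
  induction rows with
  | nil => intro k st _ _; simp [pvPass2A]
  | cons row rest ih =>
    intro k st hdrop hinv
    have hk : k < full.length := by
      by_contra h
      rw [List.drop_eq_nil_of_le (by omega)] at hdrop
      exact (List.cons_ne_nil _ _) hdrop.symm
    have hrowk : full.getD k "" = row := by
      have h0 : (full.drop k)[0]? = some row := by rw [hdrop]; rfl
      rw [List.getElem?_drop] at h0
      have h0' : full[k]? = some row := by simpa using h0
      rw [List.getD_eq_getElem?_getD, h0']
      rfl
    have hdrop' : full.drop (k + 1) = rest := by
      have : full.drop (k + 1) = (full.drop k).drop 1 := by rw [List.drop_drop]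
      rw [this, hdrop]
      rfl
    have hcast : ((k : Int) + 1) = ((k + 1 : Nat) : Int) := by push_cast; ring
    simp only [List.map_cons]
    by_cases hse : pvSeF row = true
    · obtain ⟨hcs, hce⟩ := pv_se_excl row hse
      rw [hcs, hce, hse]
      by_cases hst : 0 ≤ st
      · obtain ⟨s, hs_eq, hs_lt, hs_cs, hs_gap⟩ := hinv.resolve_left (by omega)
        have herr : pvIsErr full s = true :=
          pvIsErr_intro full s k hk hs_lt hs_cs (Or.inr (hrowk ▸ hse)) hs_gap
        rw [pv_step_se_pos _ _ _ hst, hcast]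
        obtain ⟨ihA, ihB, ihC⟩ := ih (k + 1) (-1) hdrop' (Or.inl rfl)
        refine ⟨?_, ?_, ?_⟩
        · intro e he
          rcases List.mem_cons.mp he with rfl | h
          · exact ⟨s, hs_eq, herr⟩
          · exact ihA e h
        · refine List.pairwise_cons.mpr ⟨?_, ihB⟩
          intro e he
          rcases ihC e he with ⟨rfl, h0⟩ | hke
          · omega
          · push_cast at hke ⊢; omega
        · intro e he
          rcases List.mem_cons.mp he with rfl | h
          · exact Or.inl ⟨rfl, hst⟩
          · rcases ihC e h with ⟨rfl, h0⟩ | hke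
            · omega
            · right; push_cast at hke ⊢; omega
      · have hst1 : st = -1 := hinv.resolve_right (by rintro ⟨s, rfl, -, -, -⟩; exact hst (Int.natCast_nonneg s))
        rw [pv_step_se_neg _ _ _ hst, hcast]
        obtain ⟨ihA, ihB, ihC⟩ := ih (k + 1) st hdrop' (Or.inl hst1)
        refine ⟨ihA, ihB, ?_⟩
        intro e he
        rcases ihC e he with ⟨rfl, h0⟩ | hke
        · omega
        · right; push_cast at hke ⊢; omega
    · have hseF : pvSeF row = false := by simpa using hse
      rw [hseF]
      by_cases hcs : pvCsF row = true
      · rw [hcs]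
        have hst3inv : ((if pvCeF row then (-1:Int) else ((k:Int))) = -1 ∨
            ∃ s : Nat, (if pvCeF row then (-1:Int) else ((k:Int))) = (s : Int) ∧ s < k + 1 ∧
              pvCsF (full.getD s "") = true ∧
              ∀ m, m < k + 1 → s < m → pvSigF (full.getD m "") = false) := by
          by_cases hce : pvCeF row = true
          · rw [if_pos hce]; exact Or.inl rfl
          · rw [if_neg hce]
            exact Or.inr ⟨k, rfl, by omega, hrowk ▸ hcs, fun m hm hsm => absurd hsm (by omega)⟩
        by_cases hst : 0 ≤ st
        · obtain ⟨s, hs_eq, hs_lt, hs_cs, hs_gap⟩ := hinv.resolve_left (by omega)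
          have herr : pvIsErr full s = true :=
            pvIsErr_intro full s k hk hs_lt hs_cs (Or.inl (hrowk ▸ hcs)) hs_gap
          rw [pv_step_cs_pos _ _ _ _ hst, hcast]
          obtain ⟨ihA, ihB, ihC⟩ := ih (k + 1) _ hdrop' hst3inv
          refine ⟨?_, ?_, ?_⟩
          · intro e he
            rcases List.mem_cons.mp he with rfl | h
            · exact ⟨s, hs_eq, herr⟩
            · exact ihA e h
          · refine List.pairwise_cons.mpr ⟨?_, ihB⟩
            intro e he
            rcases ihC e he with ⟨rfl, h0⟩ | hke
            · split_ifs at h0 ⊢ with hce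
              · exact absurd h0 (by omega)
              · omega
            · push_cast at hke
              omega
          · intro e he
            rcases List.mem_cons.mp he with rfl | h
            · exact Or.inl ⟨rfl, hst⟩
            · rcases ihC e h with ⟨rfl, h0⟩ | hke
              · split_ifs at h0 ⊢ with hce
                · exact absurd h0 (by omega)
                · right; push_cast; omega
              · right; push_cast at hke ⊢; omega
        · rw [pv_step_cs_neg _ _ _ _ hst, hcast]
          obtain ⟨ihA, ihB, ihC⟩ := ih (k + 1) _ hdrop' hst3inv
          refine ⟨ihA, ihB, ?_⟩
          intro e he
          rcases ihC e he with ⟨rfl, h0⟩ | hke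
          · split_ifs at h0 ⊢ with hce
            · exact absurd h0 (by omega)
            · right; push_cast; omega
          · right; push_cast at hke ⊢; omega
      · have hcsF : pvCsF row = false := by simpa using hcs
        rw [hcsF]
        have hst3inv : ((if pvCeF row then (-1:Int) else st) = -1 ∨
            ∃ s : Nat, (if pvCeF row then (-1:Int) else st) = (s : Int) ∧ s < k + 1 ∧
              pvCsF (full.getD s "") = true ∧
              ∀ m, m < k + 1 → s < m → pvSigF (full.getD m "") = false) := by
          by_cases hce : pvCeF row = true
          · rw [if_pos hce]; exact Or.inl rfl
          · have hceF : pvCeF row = false := by simpa using hce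
            rw [if_neg hce]
            rcases hinv with h | ⟨s, hs_eq, hs_lt, hs_cs, hs_gap⟩
            · exact Or.inl h
            · refine Or.inr ⟨s, hs_eq, by omega, hs_cs, ?_⟩
              intro m hm hsm
              rcases Nat.lt_or_ge m k with h | h
              · exact hs_gap m h hsm
              · have hmk : m = k := by omega
                subst hmk
                rw [hrowk]
                simp [pvSigF, hcsF, hceF, hseF]
        rw [pv_step_plain, hcast]
        obtain ⟨ihA, ihB, ihC⟩ := ih (k + 1) _ hdrop' hst3inv
        refine ⟨ihA, ihB, ?_⟩
        intro e he
        rcases ihC e he with ⟨rfl, h0⟩ | hke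
        · split_ifs at h0 ⊢
          · omega
          · exact Or.inl ⟨rfl, h0⟩
        · right; push_cast at hke ⊢; omega

-- ---------- the repair fold ----------

lemma pv_pyGetD_setAt_ne (xs : List String) (i j : Int) (v d : String)
    (hj : 0 ≤ j) (hne : i ≠ j) :
    PySem.List.pyGetD (pvSetAtB xs i v) j d = PySem.List.pyGetD xs j d := by
  unfold pvSetAtB
  split_ifs with hi
  · rw [PySem.List.pyGetD_of_nonneg _ _ hj, PySem.List.pyGetD_of_nonneg _ _ hj]
    have : i.toNat ≠ j.toNat := by omega
    simp [List.getD_eq_getElem?_getD, List.getElem?_set_ne this]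
  · rfl

lemma pvStep_eq (send : List Bool) (tgt : List String) (i : Int)
    (h : PySem.List.pyGetD send (i + 1) true = true ∨
         PySem.List.pyGetD send (i + 2) true = true ∨
         (let L := (pvSplit (PySem.List.pyGetD tgt (i + 1) "") "\t").length
          (if L = 5 then 6 else L) = 6 ∨ (if L = 5 then 6 else L) = 3)) :
    pvStep3A send tgt i = pvStepB send tgt i := by
  unfold pvStep3A pvStepB
  simp only []
  set se1 := PySem.List.pyGetD send (i + 1) true with hse1
  set se2 := PySem.List.pyGetD send (i + 2) true with hse2
  set cols1a := pvSplit (PySem.List.pyGetD tgt (i + 1) "") "\t" with hc1a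
  set cols1 := if cols1a.length == 5 then cols1a ++ [""] else cols1a with hc1
  set c0 := PySem.Str.pyGet? (PySem.Str.strip (PySem.List.pyGetD cols1 2 "")) 0 with hc0
  by_cases hs : (se1 || se2) = true
  · rw [if_pos hs]
    have : (cols1.length == 3
      && !(se1 || se2)
      && (c0 == some '.' || c0 == some '-')) = false := by simp [hs]
    rw [this]
    simp [pvSetAtA, pvSetAtB, pvJoinTabA, pvJoinTabB]
  · have hL : cols1.length = 6 ∨ cols1.length = 3 := by
      rcases h with h | h | h
      · exact absurd (by simp [← hse1, h]) hs
      · exact absurd (by simp [← hse2, h]) hs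
      · simp only [← hc1a] at h
        rw [hc1]
        by_cases h5 : cols1a.length = 5
        · left; simp [h5]
        · simp only [if_neg h5] at h
          rwa [if_neg (by simpa using h5)]
    rw [if_neg hs]
    rcases hL with h6 | h3
    · rw [if_pos (by simp [h6])]
      have : (cols1.length == 3 && !(se1 || se2) && (c0 == some '.' || c0 == some '-')) = false := by
        simp [h6]
      rw [this]
      simp [pvSetAtA, pvSetAtB, pvJoinTabA, pvJoinTabB]
    · rw [if_neg (by simp [h3])]
      by_cases hm : (c0 == some '.' || c0 == some '-') = true
      · rw [if_neg (by simp [h3, hm]), if_pos (by simp [h3, hm])]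
        have : (cols1.length == 3 && !(se1 || se2) && (c0 == some '.' || c0 == some '-')) = true := by
          simp [h3, hm, hs]
        rw [this]
        simp [pvSetAtA, pvSetAtB, pvJoinTabA, pvJoinTabB]
      · rw [if_pos (by simp [h3]; simpa using hm)]
        have : (cols1.length == 3 && !(se1 || se2) && (c0 == some '.' || c0 == some '-')) = false := by
          simp [hm]
        rw [this]
        simp [pvSetAtA, pvSetAtB, pvJoinTabA, pvJoinTabB]

lemma pvRepair_eq (send : List Bool) :
    ∀ (errs : List Int) (tgt : List String),
      List.Pairwise (· < ·) errs →
      (∀ e ∈ errs, 0 ≤ e ∧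
        (PySem.List.pyGetD send (e + 1) true = true ∨
         PySem.List.pyGetD send (e + 2) true = true ∨
         (let L := (pvSplit (PySem.List.pyGetD tgt (e + 1) "") "\t").length
          (if L = 5 then 6 else L) = 6 ∨ (if L = 5 then 6 else L) = 3))) →
      pvPass3A send tgt errs = pvRepairB send tgt errs := by
  intro errs
  induction errs with
  | nil => intro tgt _ _; rfl
  | cons e t ih =>
    intro tgt hpw hg
    obtain ⟨he0, heG⟩ := hg e List.mem_cons_self
    have hstep : pvStep3A send tgt e = pvStepB send tgt e := pvStep_eq send tgt e heG
    have hfold : pvPass3A send tgt (e :: t) = pvPass3A send (pvStepB send tgt e) t := by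
      simp [pvPass3A, hstep]
    have hfoldB : pvRepairB send tgt (e :: t) = pvRepairB send (pvStepB send tgt e) t := by
      simp [pvRepairB]
    rw [hfold, hfoldB]
    refine ih (pvStepB send tgt e) (List.pairwise_cons.mp hpw).2 ?_
    intro e' he'
    have hlt : e < e' := (List.pairwise_cons.mp hpw).1 e' he'
    obtain ⟨he0', heG'⟩ := hg e' (List.mem_cons_of_mem _ he')
    refine ⟨he0', ?_⟩
    have hget : PySem.List.pyGetD (pvStepB send tgt e) (e' + 1) ""
        = PySem.List.pyGetD tgt (e' + 1) "" := by
      unfold pvStepB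
      rw [pv_pyGetD_setAt_ne _ _ _ _ _ (by omega) (by omega),
          pv_pyGetD_setAt_ne _ _ _ _ _ (by omega) (by omega)]
    rw [hget]
    exact heG'

-- ---------- assembling ----------

lemma pvIsErr_elim (rows : List String) (s : Nat) (h : pvIsErr rows s = true) :
    s + 1 < rows.length := by
  unfold pvIsErr at h
  simp only [Bool.and_eq_true, List.any_eq_true, List.mem_range, decide_eq_true_eq] at h
  obtain ⟨-, j, hj, ⟨⟨hsj, -⟩, -⟩⟩ := h
  omega

lemma pv_getD_map {β : Type} (f : String → β) (rows : List String) (m : Nat) (d : β)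
    (hm : m < rows.length) : (rows.map f).getD m d = f (rows.getD m "") := by
  rw [List.getD_eq_getElem?_getD, List.getElem?_map, List.getD_eq_getElem?_getD,
      List.getElem?_eq_getElem hm]
  simp

set_option maxHeartbeats 1000000 in
theorem repair_broken_composites_spec : Claim_equal_repair_broken_composites := by
  intro src _hDom hPre
  unfold Spec_repair_broken_composites
  unfold repair_broken_composites repair_broken_composites_alt
  rw [pvPass1A_spec, pvScanB_spec]
  dsimp only
  rw [pv_zip3_map]
  congr 1
  have hsound := pvPass2A_sound (pvSplit src "\n") (pvSplit src "\n") 0 (-1) (by simp) (Or.inl rfl)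
  simp only [Nat.cast_zero] at hsound
  apply pvRepair_eq
  · exact hsound.2.1
  · intro e he
    obtain ⟨s1, rfl, herr⟩ := hsound.1 e he
    have hlen : s1 + 1 < (pvSplit src "\n").length := pvIsErr_elim (pvSplit src "\n") s1 herr
    refine ⟨Int.natCast_nonneg _, ?_⟩
    have hsafe := hPre.2 s1 (List.mem_range.mpr (by omega)) herr
    unfold pvSafe at hsafe
    have hc1 := ((Bool.and_eq_true _ _).mp (((Bool.and_eq_true _ _).mp hsafe).1)).1
    have hcast1 : (s1 : Int) + 1 = ((s1 + 1 : Nat) : Int) := by push_cast; ring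
    by_cases hse1 : pvSeF ((pvSplit src "\n").getD (s1 + 1) "") = true
    · left
      rw [hcast1, PySem.List.pyGetD_natCast, pv_getD_map pvSeF (pvSplit src "\n") (s1 + 1) true hlen]
      exact hse1
    · right; right
      have hL : ((if (pvSplit ((pvSplit src "\n").getD (s1 + 1) "") "\t").length = 5 then 6
          else (pvSplit ((pvSplit src "\n").getD (s1 + 1) "") "\t").length) = 6 ∨
          (if (pvSplit ((pvSplit src "\n").getD (s1 + 1) "") "\t").length = 5 then 6
          else (pvSplit ((pvSplit src "\n").getD (s1 + 1) "") "\t").length) = 3) := by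
        by_cases h5 : (pvSplit ((pvSplit src "\n").getD (s1 + 1) "") "\t").length = 5
        · left; rw [if_pos h5]
        · rw [if_neg h5]
          rcases (Bool.or_eq_true _ _).mp hc1 with h | h
          · rcases (Bool.or_eq_true _ _).mp h with h | h
            · left
              simp only [beq_iff_eq] at h
              rwa [if_neg h5] at h
            · right
              simp only [beq_iff_eq] at h
              rwa [if_neg h5] at h
          · exact absurd (by simpa using ((Bool.and_eq_true _ _).mp h).2) hse1
      rw [hcast1, PySem.List.pyGetD_natCast, pv_getD_map pvFixRow (pvSplit src "\n") (s1 + 1) "" hlen]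
      simp only [pv_fixRow_split_length]
      exact hL
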